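-- pv_equiv track=rewrite | github.com/Clear-Match-Talent/candidate-triage-system | filtering/evaluator.py | _normalize_evaluations
-- ===== SOURCE A (Python) =====
-- from typing import Any, Dict, List, Optional
--
-- def normalize_status(value: Optional[str]) -> str:
--     if not value:
--         return "Unsure"
--     normalized = value.strip().lower()
--     if normalized.startswith("pass"):
--         return "Pass"
--     if normalized.startswith("fail"):
--         return "Fail"
--     if normalized.startswith("unsure") or normalized.startswith("unknown"):
--         return "Unsure"
--     return "Unsure"
--
-- def _normalize_evaluations(
--     criteria: List[str], response_items: Any
-- ) -> List[Dict[str, str]]: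
--     response_map: Dict[str, Dict[str, str]] = {}
--     if isinstance(response_items, list):
--         for item in response_items:
--             if not isinstance(item, dict):
--                 continue
--             criterion = (item.get("criterion") or "").strip()
--             if criterion:
--                 response_map[criterion] = item
--
--     normalized: List[Dict[str, str]] = []
--     for criterion in criteria:
--         item = response_map.get(criterion, {})
--         status = normalize_status(item.get("status"))
--         reason = (item.get("reason") or "").strip() or "Insufficient information."
--         normalized.append(
--             {"criterion": criterion, "status": status, "reason": reason}
--         )
--     return normalized
-- ===== SOURCE B (Python) =====
-- from typing import Any, Dict, List, Optional
--
-- _STATUS_PREFIXES = (("pass", "Pass"), ("fail", "Fail"))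
--
-- def _last_match(response_items, criterion):
--     if isinstance(response_items, list):
--         for item in reversed(response_items):
--             if isinstance(item, dict):
--                 if criterion and (item.get("criterion") or "").strip() == criterion:
--                     return item
--     return {}
--
-- def _status_of(value):
--     s = (value or "").strip().lower()
--     for prefix, label in _STATUS_PREFIXES:
--         if s.startswith(prefix):
--             return label
--     return "Unsure"
--
-- def _reason_of(value):
--     r = (value or "").strip()
--     return r if r else "Insufficient information."
--
-- def _normalize_evaluations(criteria, response_items):
--     return [
--         {
--             "criterion": c,
--             "status": _status_of(m.get("status")),
--             "reason": _reason_of(m.get("reason")),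
--         }
--         for c in criteria
--         for m in (_last_match(response_items, c),)
--     ]
-- ===== Notes on version B (the rewrite author's own statement) =====
-- stated objective: alternative
-- what changed: B drops A's prebuilt criterion->item dict: for each criterion it finds the last matching item by a first-match scan over the reversed list, and replaces the status if-chain by a prefix table lookup, building the output as a comprehension with small helpers.
import Mathlib
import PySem

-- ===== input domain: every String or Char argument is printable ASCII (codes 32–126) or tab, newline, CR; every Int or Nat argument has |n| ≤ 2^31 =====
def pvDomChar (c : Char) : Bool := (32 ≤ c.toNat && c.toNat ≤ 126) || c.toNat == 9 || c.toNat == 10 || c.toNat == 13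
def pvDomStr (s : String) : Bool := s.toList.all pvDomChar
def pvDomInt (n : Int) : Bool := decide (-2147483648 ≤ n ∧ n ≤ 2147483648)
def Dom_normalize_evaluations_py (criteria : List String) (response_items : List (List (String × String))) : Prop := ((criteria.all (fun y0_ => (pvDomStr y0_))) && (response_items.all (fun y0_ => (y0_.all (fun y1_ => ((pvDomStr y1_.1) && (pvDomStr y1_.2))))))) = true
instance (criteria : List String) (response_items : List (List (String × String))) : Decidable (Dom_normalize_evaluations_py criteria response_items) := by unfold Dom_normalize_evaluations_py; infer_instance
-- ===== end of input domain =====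

-- B replaces A's prebuilt criterion→item dict by a per-criterion reversed-list first-match scan and a prefix table for statuses — an alternative decomposition, same results.


-- ===== PORT A =====
-- normalize_status as A writes it (if-chain over prefixes)
def normalizeStatus (value : Option String) : String :=
  match value with
  | none => "Unsure"
  | some v =>
    if v = "" then "Unsure"
    else
      let normalized := PySem.Str.lower (PySem.Str.strip v)
      if PySem.Str.startswith normalized "pass" then "Pass"
      else if PySem.Str.startswith normalized "fail" then "Fail"
      else if PySem.Str.startswith normalized "unsure" || PySem.Str.startswith normalized "unknown" then "Unsure"
      else "Unsure"

-- item.get(k) on a Python dict ↦ PySem.Dict.get? on the assoc list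
def itemGet? (item : List (String × String)) (k : String) : Option String :=
  (PySem.Dict.mk item).get? k

def normalize_evaluations_py (criteria : List String) (response_items : List (List (String × String))) : List (List (String × String)) :=
  -- isinstance checks are always true under the type convention (a list of dicts)
  let response_map : PySem.Dict String (List (String × String)) :=
    response_items.foldl (fun m item =>
      let criterion := PySem.Str.strip ((itemGet? item "criterion").getD "")
      if criterion ≠ "" then m.insert criterion item else m) PySem.Dict.empty
  criteria.foldl (fun acc criterion =>
    let item := (response_map.get? criterion).getD []
    let status := normalizeStatus (itemGet? item "status")
    let reason :=
      let r := PySem.Str.strip ((itemGet? item "reason").getD "")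
      if r = "" then "Insufficient information." else r
    acc ++ [[("criterion", criterion), ("status", status), ("reason", reason)]]) []

-- ===== PORT B =====
-- B's dict .get is transliterated as the first-match association-list lookup (what a Python dict lookup is)
def assocGet? (item : List (String × String)) (k : String) : Option String :=
  (item.find? (fun kv => kv.1 == k)).map Prod.snd

-- _last_match: first item of the REVERSED list whose stripped 'criterion' equals the (nonempty) criterion
def lastMatch (response_items : List (List (String × String))) (criterion : String) : List (String × String) :=
  ((response_items.reverse.find? (fun item =>
      criterion != "" && PySem.Str.strip ((assocGet? item "criterion").getD "") == criterion)).getD [])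

-- _status_of: prefix table scan
def statusPrefixes : List (String × String) := [("pass", "Pass"), ("fail", "Fail")]

def statusOf (value : Option String) : String :=
  let s := PySem.Str.lower (PySem.Str.strip (value.getD ""))
  match statusPrefixes.find? (fun pl => PySem.Str.startswith s pl.1) with
  | some pl => pl.2
  | none => "Unsure"

-- _reason_of
def reasonOf (value : Option String) : String :=
  let r := PySem.Str.strip (value.getD "")
  if r == "" then "Insufficient information." else r

def normalize_evaluations_py_alt (criteria : List String) (response_items : List (List (String × String))) : List (List (String × String)) :=
  criteria.map (fun c =>
    let m := lastMatch response_items c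
    [("criterion", c),
     ("status", statusOf (assocGet? m "status")),
     ("reason", reasonOf (assocGet? m "reason"))])

-- ===== PRECONDITION & SPEC =====
def Spec_normalize_evaluations_py (criteria : List String) (response_items : List (List (String × String))) (out : List (List (String × String))) : Prop := out = normalize_evaluations_py_alt criteria response_items
instance (criteria : List String) (response_items : List (List (String × String))) (out : List (List (String × String))) : Decidable (Spec_normalize_evaluations_py criteria response_items out) := by unfold Spec_normalize_evaluations_py; infer_instance

-- ===== CLAIM (what is proved, stated in full; the proofs are below) =====
def Claim_equal_normalize_evaluations_py : Prop := ∀ (criteria : List String) (response_items : List (List (String × String))), Dom_normalize_evaluations_py criteria response_items → Spec_normalize_evaluations_py criteria response_items (normalize_evaluations_py criteria response_items)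

-- ===== LEMMAS AND PROOFS =====

-- the two dict lookups are the same function
theorem itemGet?_eq_assocGet? (item : List (String × String)) (k : String) :
    itemGet? item k = assocGet? item k := by
  induction item with
  | nil => rfl
  | cons kv rest ih =>
    unfold itemGet? assocGet? at *
    rw [PySem.Dict.get?_mk_cons]
    by_cases h : kv.1 == k
    · simp [h]
    · simp only [List.find?_cons, h]
      simpa using ih

-- A's dict lookup (default {}) equals B's first-match scan of the reversed list
theorem map_lookup_eq_lastMatch (items : List (List (String × String)))
    (m : PySem.Dict String (List (String × String))) (c : String) :
    (((items.foldl (fun m item =>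
        let criterion := PySem.Str.strip ((itemGet? item "criterion").getD "")
        if criterion ≠ "" then m.insert criterion item else m) m).get? c).getD []) =
    ((items.reverse.find? (fun item =>
        c != "" && PySem.Str.strip ((assocGet? item "criterion").getD "") == c)).getD
      ((m.get? c).getD [])) := by
  induction items generalizing m with
  | nil => rfl
  | cons item rest ih =>
    simp only [List.foldl_cons, List.reverse_cons, List.find?_append]
    rw [ih]
    cases hfind : rest.reverse.find? (fun item =>
        c != "" && PySem.Str.strip ((assocGet? item "criterion").getD "") == c) with
    | some x => simp
    | none =>
      simp only [Option.none_or, List.find?_cons, itemGet?_eq_assocGet?]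
      by_cases hb : (c != "" && PySem.Str.strip ((assocGet? item "criterion").getD "") == c) = true
      · have hb' := hb
        simp only [Bool.and_eq_true, bne_iff_ne, beq_iff_eq] at hb'
        obtain ⟨hc, heq⟩ := hb'
        have hcb : (c != "") = true := bne_iff_ne.mpr hc
        simp [hcb, heq, hc, PySem.Dict.get?_insert_self]
      · simp only [hb]
        simp only [Bool.and_eq_true, bne_iff_ne, beq_iff_eq, not_and] at hb
        by_cases hstrip : PySem.Str.strip ((assocGet? item "criterion").getD "") = ""
        · simp [hstrip]
        · have hne : c ≠ PySem.Str.strip ((assocGet? item "criterion").getD "") := by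
            by_cases hc : c = ""
            · intro h; exact hstrip (h ▸ hc)
            · intro h; exact (hb hc) h.symm
          simp [hstrip, PySem.Dict.get?_insert_of_ne _ _ hne]

-- A's if-chain status equals B's table scan
theorem normalizeStatus_eq_statusOf (v : Option String) :
    normalizeStatus v = statusOf v := by
  cases v with
  | none => decide
  | some s =>
    by_cases h : s = ""
    · subst h; decide
    · unfold normalizeStatus statusOf statusPrefixes
      cases hp : PySem.Chars.startswith (PySem.Chars.lower (PySem.Chars.strip s.toList)) ['p', 'a', 's', 's'] <;>
        cases hf : PySem.Chars.startswith (PySem.Chars.lower (PySem.Chars.strip s.toList)) ['f', 'a', 'i', 'l'] <;>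
        simp [h, hp, hf, PySem.Str.startswith, PySem.Str.lower, PySem.Str.strip,
          String.toList_ofList]

-- foldl-append builds the same list as map
theorem foldl_append_eq_map {α β : Type} (l : List α) (f : α → β) (acc : List β) :
    l.foldl (fun acc x => acc ++ [f x]) acc = acc ++ l.map f := by
  induction l generalizing acc with
  | nil => simp
  | cons x xs ih => simp [ih]

-- ===== VERDICT (by name: the statement is the Claim_ definition above) =====
theorem normalize_evaluations_py_spec : Claim_equal_normalize_evaluations_py := by
  intro criteria response_items _
  unfold Spec_normalize_evaluations_py normalize_evaluations_py normalize_evaluations_py_alt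
  rw [foldl_append_eq_map]
  simp only [List.nil_append]
  apply List.map_congr_left
  intro criterion _
  rw [map_lookup_eq_lastMatch]
  simp only [PySem.Dict.get?_empty, Option.getD_none]
  unfold lastMatch reasonOf
  rw [normalizeStatus_eq_statusOf, itemGet?_eq_assocGet?, itemGet?_eq_assocGet?]
  simp [beq_iff_eq]
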